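-- pv_equiv track=rewrite | github.com/herlanin/codility | 99_future_training/str_symmetry_point.py | solution
-- ===== SOURCE A (Python) =====
-- def solution(S):
--     sLen = len(S)
--     # Symmetry point is possible, when and only when the
--     # string's length is odd.
--     if sLen % 2 == 0:   return -1
--     # With a odd-length string, the only possible symmetry
--     # point is the middle point.
--     mid = sLen // 2
--     begin, end = 0, sLen-1
--     # The middle point of an odd-length string is symmetry
--     # point, only when the string is symmetry.
--     while begin < mid:
--         if S[begin] != S[end]:      return -1
--         begin += 1
--         end -= 1
--     return mid
-- ===== SOURCE B (Python) =====
-- def solution(S):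
--     if len(S) % 2 == 0:
--         return -1
--     return len(S) // 2 if S[::-1] == S else -1
-- ===== Notes on version B (the rewrite author's own statement) =====
-- stated objective: idiomatic
-- what changed: Replaces the index-based two-pointer while loop with an early-exit branch by a whole-string reverse (S[::-1]) and a single equality comparison.
import Mathlib
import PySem

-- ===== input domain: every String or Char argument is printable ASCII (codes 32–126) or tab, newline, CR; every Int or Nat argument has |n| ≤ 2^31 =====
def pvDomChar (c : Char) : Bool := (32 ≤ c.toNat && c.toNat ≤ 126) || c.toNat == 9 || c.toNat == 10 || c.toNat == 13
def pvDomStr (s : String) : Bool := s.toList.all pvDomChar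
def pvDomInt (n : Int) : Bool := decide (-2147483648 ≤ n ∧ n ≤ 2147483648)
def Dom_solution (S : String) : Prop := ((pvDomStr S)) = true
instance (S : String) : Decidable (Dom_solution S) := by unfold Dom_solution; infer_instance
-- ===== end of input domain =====

-- B replaces A's two-pointer inward scan by a whole-string reverse and one equality test (idiomatic).

-- ===== PORT A =====
-- the while loop: begin/end walk inward while begin < mid, early return -1 on a mismatch
def solGo (cs : List Char) (mid b e : Int) : Int :=
  if _h : b < mid then
    if PySem.List.pyGet? cs b ≠ PySem.List.pyGet? cs e then -1
    else solGo cs mid (b + 1) (e - 1)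
  else mid
termination_by (mid - b).toNat
decreasing_by omega

def solution (S : String) : Int :=
  let cs := S.toList
  let sLen : Int := cs.length
  if sLen % 2 == 0 then -1
  else solGo cs (PySem.Int.floordiv sLen 2) 0 (sLen - 1)

-- ===== PORT B =====
def solution_alt (S : String) : Int :=
  if (S.toList.length : Int) % 2 == 0 then -1
  else if PySem.Str.slice? S none none (-1) = some S then
    PySem.Int.floordiv (S.toList.length : Int) 2
  else -1

-- ===== PRECONDITION & SPEC =====
def Spec_solution (S : String) (out : Int) : Prop := out = solution_alt S
instance (S : String) (out : Int) : Decidable (Spec_solution S out) := by unfold Spec_solution; infer_instance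

-- ===== CLAIM (what is proved, stated in full; the proofs are below) =====
def Claim_equal_solution : Prop := ∀ (S : String), Dom_solution S → Spec_solution S (solution S)

-- ===== LEMMAS AND PROOFS =====

lemma solGo_eq (cs : List Char) (m : Nat) (hm : cs.length = 2 * m + 1) :
    ∀ b : Nat, b ≤ m →
      solGo cs (m : Int) (b : Int) ((cs.length : Int) - 1 - (b : Int)) =
        (if ∀ i : Nat, b ≤ i → i < m → cs[i]? = cs[cs.length - 1 - i]? then (m : Int) else -1) := by
  intro b hb
  induction hn : m - b generalizing b with
  | zero =>
    have hbm : b = m := by omega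
    subst hbm
    rw [solGo, dif_neg (lt_irrefl _), if_pos (by intro i h1 h2; omega)]
  | succ k ih =>
    have hblt : b < m := by omega
    rw [solGo, dif_pos (by exact_mod_cast hblt)]
    have hget1 : PySem.List.pyGet? cs (b : Int) = cs[b]? := PySem.List.pyGet?_natCast ..
    have he : (cs.length : Int) - 1 - (b : Int) = ((cs.length - 1 - b : Nat) : Int) := by
      omega
    have hget2 : PySem.List.pyGet? cs ((cs.length : Int) - 1 - (b : Int)) = cs[cs.length - 1 - b]? := by
      rw [he]; exact PySem.List.pyGet?_natCast ..
    rw [hget1, hget2]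
    by_cases hc : cs[b]? = cs[cs.length - 1 - b]?
    · rw [if_neg (by simpa using hc)]
      have hstep : ((b : Int) + 1) = ((b + 1 : Nat) : Int) := by push_cast; ring
      have hstep2 : (cs.length : Int) - 1 - (b : Int) - 1 = (cs.length : Int) - 1 - ((b + 1 : Nat) : Int) := by
        push_cast; ring
      rw [hstep, hstep2, ih (b + 1) (by omega) (by omega)]
      by_cases hall : ∀ i : Nat, b + 1 ≤ i → i < m → cs[i]? = cs[cs.length - 1 - i]?
      · rw [if_pos hall, if_pos]
        intro i h1 h2
        rcases Nat.eq_or_lt_of_le h1 with rfl | h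
        · exact hc
        · exact hall i h h2
      · rw [if_neg hall, if_neg]
        intro hall'
        exact hall fun i h1 h2 => hall' i (by omega) h2
    · rw [if_pos (by simpa using hc), if_neg]
      intro hall
      exact hc (hall b le_rfl hblt)

lemma pal_iff (cs : List Char) (m : Nat) (hm : cs.length = 2 * m + 1) :
    cs.reverse = cs ↔ ∀ i : Nat, i < m → cs[i]? = cs[cs.length - 1 - i]? := by
  constructor
  · intro hrev i hi
    have hilen : i < cs.length := by omega
    calc cs[i]? = cs.reverse[i]? := by rw [hrev]
      _ = cs[cs.length - 1 - i]? := by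
          rw [List.getElem?_reverse (by simpa using hilen)]
  · intro hall
    apply List.ext_getElem?
    intro i
    by_cases hi : i < cs.length
    · rw [List.getElem?_reverse (by simpa using hi)]
      by_cases h1 : i < m
      · exact (hall i h1).symm
      · by_cases h2 : i = m
        · subst h2; congr 1; omega
        · -- i > m: use symmetry at j = length - 1 - i < m
          have hj : cs.length - 1 - i < m := by omega
          have := hall (cs.length - 1 - i) hj
          rw [this]; congr 1; omega
    · rw [List.getElem?_eq_none (by simp; omega), List.getElem?_eq_none (by simpa using Nat.le_of_not_lt hi)]

lemma solution_eq (S : String) : solution S = solution_alt S := by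
  unfold solution solution_alt
  rcases Nat.even_or_odd S.toList.length with he | ho
  · obtain ⟨m, hm⟩ := he
    have h2 : ((S.toList.length : Int) % 2 == 0) = true := by
      simp only [beq_iff_eq]; omega
    rw [if_pos h2, if_pos h2]
  · obtain ⟨m, hm⟩ := ho
    have h2 : ¬ (((S.toList.length : Int) % 2 == 0) = true) := by
      simp only [beq_iff_eq]; omega
    rw [if_neg h2, if_neg h2]
    have hdiv : PySem.Int.floordiv (S.toList.length : Int) 2 = (m : Int) := by
      rw [PySem.Int.floordiv, Int.fdiv_eq_ediv]
      have : (0:Int) ≤ 2 ∨ (2:Int) ∣ (S.toList.length : Int) := Or.inl (by omega)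
      rw [if_pos this]
      omega
    rw [hdiv]
    have hrev : (PySem.Str.slice? S none none (-1) = some S) ↔ S.toList.reverse = S.toList := by
      rw [PySem.Str.slice?_none_none_neg_one]
      constructor
      · intro h
        have : String.ofList S.toList.reverse = S := by simpa using h
        calc S.toList.reverse = (String.ofList S.toList.reverse).toList := by simp
          _ = S.toList := by rw [this]
      · intro h
        have : String.ofList S.toList.reverse = S := by
          rw [h]; simp
        simp [this]
    have hgo := solGo_eq S.toList m hm 0 (by omega)
    simp only [Nat.cast_zero, Int.sub_zero] at hgo
    rw [hgo]
    by_cases hp : S.toList.reverse = S.toList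
    · rw [if_pos (fun i _ h2' => (pal_iff S.toList m hm).mp hp i h2'),
          if_pos (hrev.mpr hp)]
    · rw [if_neg (fun hall => hp ((pal_iff S.toList m hm).mpr
            fun i hi => hall i (Nat.zero_le i) hi)),
          if_neg (fun h => hp (hrev.mp h))]

-- ===== VERDICT (by name: the statement is the Claim_ definition above) =====
theorem solution_spec : Claim_equal_solution := by
  intro S _
  unfold Spec_solution
  exact solution_eq S
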